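-- pv_equiv track=rewrite | github.com/jackwaterman13/Subgame-Perfect--Equilibrium | graphics/Main_GUI.py | build_all_values
-- ===== SOURCE A (Python) =====
-- def build_all_values(all_values: list):
--     values = []
--
--     for index in range(max(len(lst) for lst in all_values)):
--         row = []
--         for lst in all_values:
--             row.append(str(list_get(lst, index)))
--         values.append(tuple(row))
--
--     return values
--
-- def list_get(lst, index):
--     return lst[index] if index < len(lst) else ''
-- ===== SOURCE B (Python) =====
-- def build_all_values(all_values: list):
--     # Pad each column (as strings) to the common height, then transpose with zip.
--     n = max(len(lst) for lst in all_values)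
--     padded = [list(map(str, lst)) + [''] * (n - len(lst)) for lst in all_values]
--     return [tuple(col) for col in zip(*padded)]
-- ===== Notes on version B (the rewrite author's own statement) =====
-- stated objective: idiomatic
-- what changed: Replaces the index-driven double loop with a pad-then-transpose: each column is stringified and padded to the common height once, then rows are produced by zip(*padded).
import Mathlib
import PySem

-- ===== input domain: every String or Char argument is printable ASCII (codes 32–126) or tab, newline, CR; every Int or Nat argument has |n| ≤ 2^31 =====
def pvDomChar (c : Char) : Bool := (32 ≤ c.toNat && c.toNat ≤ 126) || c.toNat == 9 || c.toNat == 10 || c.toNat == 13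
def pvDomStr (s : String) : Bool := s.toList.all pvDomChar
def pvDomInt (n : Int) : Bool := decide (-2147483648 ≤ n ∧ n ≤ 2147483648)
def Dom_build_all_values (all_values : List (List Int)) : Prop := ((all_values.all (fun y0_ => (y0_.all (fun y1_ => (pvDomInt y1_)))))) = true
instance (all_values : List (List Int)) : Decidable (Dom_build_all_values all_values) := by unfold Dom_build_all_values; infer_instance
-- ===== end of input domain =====

-- B replaces A's index-driven double loop by pad-then-transpose (zip of padded string columns); same cost, more idiomatic. Equal on all non-empty inputs (both raise ValueError via max() on []).

-- ===== PORT A =====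
-- str(list_get(lst, index)) fused at its only use site (list_get returns int-or-'' which has no single Lean type)
def list_get_str (lst : List Int) (index : Nat) : String :=
  if index < lst.length then PySem.Int.toStr (lst.getD index 0) else ""

def build_all_values (all_values : List (List Int)) : List (List String) :=
  -- max(len(lst) for lst in all_values); Pre_ guarantees all_values ≠ [] (else Python raises ValueError)
  let n : Nat := (all_values.map List.length).foldl Nat.max 0
  (List.range n).foldl
    (fun values index =>
      values ++ [all_values.foldl (fun row lst => row ++ [list_get_str lst index]) []])
    []

-- ===== PORT B =====
-- zip(*padded): take heads while every row is non-empty (fuel = a totality device; the guard is the stopper)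
def zipRows (fuel : Nat) (rows : List (List String)) : List (List String) :=
  match fuel with
  | 0 => []
  | f + 1 =>
    if rows ≠ [] ∧ rows.all (· ≠ []) then
      rows.map (·.headD "") :: zipRows f (rows.map (·.drop 1))
    else []

def build_all_values_alt (all_values : List (List Int)) : List (List String) :=
  let n : Nat := (all_values.map List.length).foldl Nat.max 0
  let padded := all_values.map (fun lst => lst.map PySem.Int.toStr ++ List.replicate (n - lst.length) "")
  zipRows (n + 1) padded

-- ===== PRECONDITION & SPEC =====
-- Pre_ excludes only the empty outer list, where Python A raises ValueError (max() of an empty sequence)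
def Pre_build_all_values (all_values : List (List Int)) : Prop := all_values ≠ []
instance (all_values : List (List Int)) : Decidable (Pre_build_all_values all_values) := by unfold Pre_build_all_values; infer_instance
def pvWitness_build_all_values : List (List Int) := [[1, 2], [3]]

def Spec_build_all_values (all_values : List (List Int)) (out : List (List String)) : Prop := out = build_all_values_alt all_values
instance (all_values : List (List Int)) (out : List (List String)) : Decidable (Spec_build_all_values all_values out) := by unfold Spec_build_all_values; infer_instance

-- ===== CLAIM (what is proved, stated in full; the proofs are below) =====
def Claim_equal_build_all_values : Prop := ∀ (all_values : List (List Int)), Dom_build_all_values all_values → Pre_build_all_values all_values → Spec_build_all_values all_values (build_all_values all_values)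

-- ===== LEMMAS AND PROOFS =====

theorem foldl_append_map {α β : Type} (f : α → β) (l : List α) (acc : List β) :
    l.foldl (fun r x => r ++ [f x]) acc = acc ++ l.map f := by
  induction l generalizing acc with
  | nil => simp
  | cons x xs ih => simp [List.foldl, ih]

theorem foldl_max_init (l : List Nat) (a : Nat) : a ≤ l.foldl Nat.max a := by
  induction l generalizing a with
  | nil => simp
  | cons y ys ih => exact le_trans (Nat.le_max_left a y) (ih (Nat.max a y))

theorem le_foldl_max (l : List Nat) (a x : Nat) (h : x ∈ l) : x ≤ l.foldl Nat.max a := by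
  induction l generalizing a with
  | nil => cases h
  | cons y ys ih =>
    rcases List.mem_cons.mp h with rfl | h
    · exact le_trans (Nat.le_max_right a x) (foldl_max_init ys _)
    · exact ih _ h

-- A's outer loop is a map over range n
theorem buildA_eq_map (all_values : List (List Int)) :
    build_all_values all_values =
      (List.range ((all_values.map List.length).foldl Nat.max 0)).map
        (fun i => all_values.map (fun lst => list_get_str lst i)) := by
  unfold build_all_values
  rw [foldl_append_map (fun i => all_values.foldl (fun row lst => row ++ [list_get_str lst i]) [])]
  simp only [List.nil_append]
  apply List.map_congr_left
  intro i _
  rw [foldl_append_map]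
  simp

-- padded columns index like list_get_str, for every i
theorem padded_getD (lst : List Int) (n i : Nat) :
    (lst.map PySem.Int.toStr ++ List.replicate (n - lst.length) "").getD i "" =
      list_get_str lst i := by
  unfold list_get_str
  by_cases h : i < lst.length
  · rw [List.getD_append _ _ _ _ (by simpa using h)]
    simp [List.getD, h]
  · simp only [h, if_false]
    rcases Nat.lt_or_ge i (lst.length + (n - lst.length)) with hlt | hge
    · rw [List.getD_eq_getElem _ _ (by simpa using hlt)]
      rw [List.getElem_append_right (by simpa using h)]
      simp
    · rw [List.getD_eq_default _ _ (by simpa using hge)]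

-- zipRows over equal-length non-empty rows is the column map
theorem zipRows_eq_map (n : Nat) (rows : List (List String))
    (hne : rows ≠ []) (hlen : ∀ r ∈ rows, r.length = n) :
    zipRows (n + 1) rows = (List.range n).map (fun i => rows.map (·.getD i "")) := by
  induction n generalizing rows with
  | zero =>
    obtain ⟨r, hr⟩ := List.exists_mem_of_ne_nil rows hne
    have hr0 : r = [] := List.eq_nil_of_length_eq_zero (hlen r hr)
    have hguard : ¬ (rows ≠ [] ∧ rows.all (· ≠ []) = true) := by
      rintro ⟨-, hall⟩
      have hr' : r ≠ [] := by simpa using List.all_eq_true.mp hall r hr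
      exact hr' hr0
    rw [zipRows, if_neg hguard]
    simp
  | succ m ih =>
    have hall : rows.all (· ≠ []) = true := by
      rw [List.all_eq_true]
      intro r hr
      simp only [decide_eq_true_eq]
      intro h0
      simpa [h0] using hlen r hr
    rw [zipRows, if_pos ⟨hne, hall⟩]
    rw [ih (rows.map (·.drop 1)) (by simpa using hne)
        (by intro r hr; obtain ⟨s, hs, rfl⟩ := List.mem_map.mp hr;
            have := hlen s hs; simp [this])]
    rw [List.range_succ_eq_map]
    simp only [List.map_cons, List.map_map]
    congr 1
    · apply List.map_congr_left
      intro r hr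
      have hr' : r ≠ [] := by simpa using List.all_eq_true.mp hall r hr
      cases r with
      | nil => exact absurd rfl hr'
      | cons a t => simp
    · apply List.map_congr_left
      intro i _
      simp only [Function.comp]
      apply List.map_congr_left
      intro r hr
      have hr' : r ≠ [] := by simpa using List.all_eq_true.mp hall r hr
      cases r with
      | nil => exact absurd rfl hr'
      | cons a t => simp

-- ===== VERDICT (by name: the statement is the Claim_ definition above) =====
theorem build_all_values_spec : Claim_equal_build_all_values := by
  intro all_values _ hpre
  unfold Spec_build_all_values
  rw [buildA_eq_map]
  unfold build_all_values_alt
  set n := (all_values.map List.length).foldl Nat.max 0 with hn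
  have hmax : ∀ l ∈ all_values, l.length ≤ n := fun l hl =>
    le_foldl_max _ 0 _ (List.mem_map_of_mem hl)
  rw [zipRows_eq_map n _ (by simpa using hpre)
      (by intro r hr; obtain ⟨l, hl, rfl⟩ := List.mem_map.mp hr
          simp only [List.length_append, List.length_map, List.length_replicate]
          have := hmax l hl; omega)]
  apply List.map_congr_left
  intro i _
  rw [List.map_map]
  apply List.map_congr_left
  intro l hl
  exact (padded_getD l n i).symm
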